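-- pv_equiv track=rewrite | github.com/rprebet/maximal_matroids | hypergraph.py | rem_sub
-- ===== SOURCE A (Python) =====
-- def rem_sub(XT):
--     """
--     Input: labeled hypergraph XT (2-list of sets)
--     Remove redundant subsets from XT to satisfy the
--     axioms of labeled hypergraphs.
--     """
--     XT_new = [XT[0].copy(), XT[1].copy()]  # Avoid modifying the input
--
--     # Criterion 1: Remove sets that are subsets of another set in XT[k]
--     for k in range(len(XT_new)):
--         XT_new[k] = [
--             s for i, s in enumerate(XT_new[k])
--             if not any(s <= XT_new[k][j] for j in range(len(XT_new[k])) if i != j)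
--         ]
--
--     # Criterion 2: Remove sets in XT[1] that are one element larger than a set in XT[0]
--     if len(XT_new) > 1:
--         XT_new[1] = [
--             s for s in XT_new[1]
--             if not any(len(t) + 1 == len(s) and t <= s for t in XT_new[0])
--         ]
--
--     return XT_new
-- ===== SOURCE B (Python) =====
-- def rem_sub(XT):
--     def prune(col):
--         counts = {}
--         for s in col:
--             f = frozenset(s)
--             counts[f] = counts.get(f, 0) + 1
--         return [s for s in col
--                 if counts[frozenset(s)] == 1
--                 and not any(len(g) > len(s) and frozenset(s) <= g for g in counts)]
--
--     a = prune(XT[0])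
--     afro = {frozenset(t) for t in a}
--     b = [s for s in prune(XT[1])
--          if not any(frozenset(s) - {x} in afro for x in s)]
--     return [a, b]
-- ===== Notes on version B (the rewrite author's own statement) =====
-- stated objective: alternative
-- what changed: A removes dominated sets with index-based all-pairs subset scans (and scans all of XT[0] for criterion 2); B builds a frozenset multiplicity counter per collection, removes duplicates by count, tests domination only against the strictly larger distinct sets (the counter's keys), and decides criterion 2 by deleting one element at a time from s and looking the result up in the set of XT[0]'s survivors.
import Mathlib
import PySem

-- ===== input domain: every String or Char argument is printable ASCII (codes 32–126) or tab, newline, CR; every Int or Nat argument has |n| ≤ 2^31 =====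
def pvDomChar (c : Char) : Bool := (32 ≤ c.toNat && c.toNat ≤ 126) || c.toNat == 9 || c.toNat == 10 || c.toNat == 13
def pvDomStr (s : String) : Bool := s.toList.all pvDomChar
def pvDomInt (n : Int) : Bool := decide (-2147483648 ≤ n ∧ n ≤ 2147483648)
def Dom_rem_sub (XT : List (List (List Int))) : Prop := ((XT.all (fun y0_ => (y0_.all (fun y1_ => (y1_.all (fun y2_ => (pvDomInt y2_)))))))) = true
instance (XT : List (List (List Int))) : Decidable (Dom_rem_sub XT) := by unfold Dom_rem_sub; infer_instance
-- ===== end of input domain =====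

-- B replaces A's quadratic index-based all-pairs subset scans by a frozenset multiplicity
-- counter (duplicates removed by count, domination checked only against strictly larger
-- distinct sets) and replaces criterion 2's scan of XT[0] by per-element deletion plus a
-- set-membership test; objective: alternative decomposition of the same task.

-- ===== PORT A =====

-- Python's `s <= t` on sets: subset via membership (exact for the distinct-element list encoding)
def pySubsetB (s t : List Int) : Bool := s.all (fun e => t.contains e)

-- the criterion-1 comprehension of A, applied to one collection
def crit1A (L : List (List Int)) : List (List Int) :=
  (PySem.List.enumerate L).filterMap (fun p =>
    if (PySem.List.pyRange 0 (L.length : Int) 1).any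
         (fun j => decide (p.1 ≠ j) && pySubsetB p.2 (PySem.List.pyGetD L j [])) then
      none
    else some p.2)

def rem_sub (XT : List (List (List Int))) : List (List (List Int)) :=
  -- XT[0], XT[1]: IndexError (none) outside Pre_; .copy() is identity on the return value
  let XT0 := (PySem.List.pyGet? XT 0).getD []
  let XT1 := (PySem.List.pyGet? XT 1).getD []
  -- Criterion 1, for k = 0 and k = 1
  let c0 := crit1A XT0
  let c1 := crit1A XT1
  -- Criterion 2 (len(XT_new) = 2 > 1 always)
  let c1' := c1.filter (fun s =>
    !(c0.any (fun t => (t.length + 1 == s.length) && pySubsetB t s)))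
  [c0, c1']

-- ===== PORT B =====

-- frozenset equality = mutual inclusion (exact for the distinct-element list encoding)
def setEqB (s t : List Int) : Bool := pySubsetB s t && pySubsetB t s

-- Python dict keyed by frozensets, ported by hand as an association list in insertion order
-- with first-match lookup under set equality (exact: counts.get / counts[...] assignment)
def cntGet : List (List Int × Int) → List Int → Option Int
  | [], _ => none
  | (k, v) :: r, f => if setEqB k f then some v else cntGet r f

def cntBump : List (List Int × Int) → List Int → List (List Int × Int)
  | [], f => [(f, 1)]
  | (k, v) :: r, f => if setEqB k f then (k, v + 1) :: r else (k, v) :: cntBump r f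

-- Source B's prune: multiplicity counter, then keep the uniquely-occurring sets that have no
-- strictly larger superset among the distinct sets (the counter's keys)
def pruneB (col : List (List Int)) : List (List Int) :=
  let counts := col.foldl (fun d s => cntBump d s) []
  col.filter (fun s =>
    ((cntGet counts s).getD 0 == 1) &&   -- counts[frozenset(s)]: the key is always present
    !(counts.any (fun g => decide (s.length < g.1.length) && pySubsetB s g.1)))

def rem_sub_alt (XT : List (List (List Int))) : List (List (List Int)) :=
  let a := pruneB ((PySem.List.pyGet? XT 0).getD [])
  -- afro = {frozenset(t) for t in a}: membership below is a set-equality search in a;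
  -- frozenset(s) - {x} is s with every occurrence of x removed
  let b := (pruneB ((PySem.List.pyGet? XT 1).getD [])).filter (fun s =>
    !(s.any (fun x => a.any (fun t => setEqB (s.filter (fun e => decide (e ≠ x))) t))))
  [a, b]

-- ===== PRECONDITION & SPEC =====
-- Pre_ excludes (i) inputs with fewer than two collections, on which A (XT[1]) raises
-- IndexError (B raises there too), and (ii) inner lists with duplicate elements, which are
-- not encodings of Python sets under the type convention (the tester passes the inner lists
-- to Python as sets, i.e. lists of DISTINCT elements).
def Pre_rem_sub (XT : List (List (List Int))) : Prop :=
  2 ≤ XT.length ∧ ∀ col ∈ XT, ∀ s ∈ col, s.Nodup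
instance (XT : List (List (List Int))) : Decidable (Pre_rem_sub XT) := by unfold Pre_rem_sub; infer_instance
def pvWitness_rem_sub : List (List (List Int)) := [[[1], [1, 2]], [[2], [0, 1]]]

def Spec_rem_sub (XT : List (List (List Int))) (out : List (List (List Int))) : Prop := out = rem_sub_alt XT
instance (XT : List (List (List Int))) (out : List (List (List Int))) : Decidable (Spec_rem_sub XT out) := by unfold Spec_rem_sub; infer_instance

-- ===== CLAIM (what is proved, stated in full; the proofs are below) =====
def Claim_equal_rem_sub : Prop := ∀ (XT : List (List (List Int))), Dom_rem_sub XT → Pre_rem_sub XT → Spec_rem_sub XT (rem_sub XT)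

-- ===== LEMMAS AND PROOFS =====

-- set-view of the two boolean primitives
theorem pySubsetB_iff (s t : List Int) : pySubsetB s t = true ↔ s.toFinset ⊆ t.toFinset := by
  simp [pySubsetB, List.all_eq_true, Finset.subset_iff, List.mem_toFinset]

theorem setEqB_iff (s t : List Int) : setEqB s t = true ↔ s.toFinset = t.toFinset := by
  simp only [setEqB, Bool.and_eq_true, pySubsetB_iff]
  exact ⟨fun h => Finset.Subset.antisymm h.1 h.2, fun h => ⟨h.le, h.ge⟩⟩

theorem setEqB_refl (s : List Int) : setEqB s s = true := (setEqB_iff s s).mpr rfl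

-- counter lemmas: lookup after one bump, lookup after building, keys of the built counter
theorem cntGet_cntBump (d : List (List Int × Int)) (t s : List Int) :
    cntGet (cntBump d t) s =
      if setEqB t s then some ((cntGet d s).getD 0 + 1) else cntGet d s := by
  induction d with
  | nil =>
    simp only [cntBump, cntGet]
    by_cases h : setEqB t s = true <;> simp [h]
  | cons e r ih =>
    obtain ⟨k, v⟩ := e
    simp only [cntBump]
    by_cases hkt : setEqB k t = true
    · have hkt' := (setEqB_iff k t).mp hkt
      by_cases hts : setEqB t s = true
      · have hts' := (setEqB_iff t s).mp hts
        have hks : setEqB k s = true := (setEqB_iff k s).mpr (hkt'.trans hts')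
        simp [hkt, hts, cntGet, hks]
      · have hks : setEqB k s = false := by
          rw [Bool.eq_false_iff]
          intro hks
          exact hts ((setEqB_iff t s).mpr (hkt'.symm.trans ((setEqB_iff k s).mp hks)))
        simp [hkt, hts, cntGet, hks]
    · by_cases hks : setEqB k s = true
      · have hks' := (setEqB_iff k s).mp hks
        have hts : setEqB t s = false := by
          rw [Bool.eq_false_iff]
          intro hts
          exact hkt ((setEqB_iff k t).mpr (hks'.trans ((setEqB_iff t s).mp hts).symm))
        simp [hkt, hts, cntGet, hks]
      · simp only [Bool.not_eq_true] at hkt hks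
        simp [hkt, cntGet, hks, ih]

theorem cntGet_foldl (col : List (List Int)) (d : List (List Int × Int)) (s : List Int) :
    (cntGet (col.foldl (fun d s => cntBump d s) d) s).getD 0 =
      (cntGet d s).getD 0 + col.countP (fun t => setEqB t s) := by
  induction col generalizing d with
  | nil => simp
  | cons t col ih =>
    simp only [List.foldl_cons, List.countP_cons, ih, cntGet_cntBump]
    by_cases h : setEqB t s = true
    · simp [h]; omega
    · simp [h]

theorem keys_foldl_sub (col : List (List Int)) (d : List (List Int × Int)) :
    ∀ e ∈ col.foldl (fun d s => cntBump d s) d, e.1 ∈ d.map Prod.fst ∨ e.1 ∈ col := by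
  induction col generalizing d with
  | nil => intro e he; exact Or.inl (List.mem_map_of_mem he)
  | cons t col ih =>
    intro e he
    rcases ih (cntBump d t) e he with h | h
    · -- keys of cntBump d t are keys of d plus possibly t
      have haux : ∀ (d' : List (List Int × Int)), ∀ k ∈ (cntBump d' t).map Prod.fst,
          k ∈ d'.map Prod.fst ∨ k = t := by
        intro d'
        induction d' with
        | nil => intro k hk; simp [cntBump] at hk; exact Or.inr hk
        | cons e' r' ih' =>
          obtain ⟨k', v'⟩ := e'
          intro k hk
          simp only [cntBump] at hk
          by_cases hkt : setEqB k' t = true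
          · rw [if_pos hkt] at hk
            simp only [List.map_cons, List.mem_cons] at hk ⊢
            exact Or.inl hk
          · rw [if_neg hkt] at hk
            simp only [List.map_cons, List.mem_cons] at hk
            rcases hk with hk | hk
            · exact Or.inl (by simp [hk])
            · rcases ih' k hk with h' | h'
              · exact Or.inl (by simp only [List.map_cons, List.mem_cons]; exact Or.inr h')
              · exact Or.inr h'
      rcases haux d e.1 h with h' | h'
      · exact Or.inl h'
      · exact Or.inr (h' ▸ List.mem_cons_self)
    · exact Or.inr (List.mem_cons_of_mem _ h)

theorem cntBump_keeps (d : List (List Int × Int)) (t k : List Int)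
    (h : k ∈ d.map Prod.fst) : k ∈ (cntBump d t).map Prod.fst := by
  induction d with
  | nil => simp at h
  | cons e r ih =>
    obtain ⟨k', v'⟩ := e
    simp only [cntBump]
    by_cases hkt : setEqB k' t = true
    · simpa [hkt] using h
    · simp only [Bool.not_eq_true] at hkt
      simp only [List.map_cons] at h
      rcases List.mem_cons.mp h with h' | h'
      · simp [hkt, h']
      · simp [hkt]
        exact Or.inr (by simpa using ih h')

theorem cntBump_hits (d : List (List Int × Int)) (t : List Int) :
    ∃ k ∈ (cntBump d t).map Prod.fst, setEqB k t = true := by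
  induction d with
  | nil => exact ⟨t, by simp [cntBump], setEqB_refl t⟩
  | cons e r ih =>
    obtain ⟨k', v'⟩ := e
    simp only [cntBump]
    by_cases hkt : setEqB k' t = true
    · exact ⟨k', by simp [hkt], hkt⟩
    · simp only [Bool.not_eq_true] at hkt
      obtain ⟨k, hk, hkeq⟩ := ih
      exact ⟨k, by simp [hkt]; exact Or.inr (by simpa using hk), hkeq⟩

theorem keys_foldl_cover (col : List (List Int)) (d : List (List Int × Int)) :
    ∀ t ∈ col, ∃ k ∈ (col.foldl (fun d s => cntBump d s) d).map Prod.fst, setEqB k t = true := by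
  induction col generalizing d with
  | nil => intro t ht; simp at ht
  | cons u col ih =>
    intro t ht
    rcases List.mem_cons.mp ht with h | h
    · subst h
      obtain ⟨k, hk, hkeq⟩ := cntBump_hits d t
      -- the key survives the remaining folds
      have hkeep : ∀ (col' : List (List Int)) (d' : List (List Int × Int)),
          k ∈ d'.map Prod.fst → k ∈ (col'.foldl (fun d s => cntBump d s) d').map Prod.fst := by
        intro col'
        induction col' with
        | nil => intro d' h'; simpa using h'
        | cons w col' ih' => intro d' h'; exact ih' _ (cntBump_keeps d' w k h')
      exact ⟨k, hkeep col (cntBump d t) hk, hkeq⟩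
    · exact ih (cntBump d u) t h

-- a nodup list has toFinset of the same cardinality
theorem len_card (s : List Int) (h : s.Nodup) : s.length = s.toFinset.card :=
  (List.toFinset_card_of_nodup h).symm

-- invariance of the superset test under set equality (among nodup lists)
theorem pred_invariant (s k t : List Int) (hk : k.Nodup) (ht : t.Nodup)
    (heq : setEqB k t = true) :
    (decide (s.length < k.length) && pySubsetB s k) =
    (decide (s.length < t.length) && pySubsetB s t) := by
  have h := (setEqB_iff k t).mp heq
  have hlen : k.length = t.length := by rw [len_card k hk, len_card t ht, h]
  have hsub : pySubsetB s k = pySubsetB s t := by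
    cases h' : pySubsetB s t with
    | false =>
      rw [Bool.eq_false_iff]
      intro hc
      rw [Bool.eq_false_iff] at h'
      exact h' ((pySubsetB_iff s t).mpr (h ▸ (pySubsetB_iff s k).mp hc))
    | true =>
      exact (pySubsetB_iff s k).mpr (h.symm ▸ (pySubsetB_iff s t).mp h')
  rw [hlen, hsub]

-- the counter's any-over-keys equals an any over the collection
theorem counts_any_eq (col : List (List Int)) (s : List Int)
    (hnd : ∀ u ∈ col, u.Nodup) :
    ((col.foldl (fun d s => cntBump d s) []).any
        (fun g => decide (s.length < g.1.length) && pySubsetB s g.1)) =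
      col.any (fun t => decide (s.length < t.length) && pySubsetB s t) := by
  cases h : col.any (fun t => decide (s.length < t.length) && pySubsetB s t) with
  | false =>
    rw [Bool.eq_false_iff]
    intro hc
    rw [Bool.eq_false_iff] at h
    apply h
    rcases List.any_eq_true.mp hc with ⟨g, hg, hpg⟩
    rcases keys_foldl_sub col [] g hg with h' | h'
    · simp at h'
    · exact List.any_eq_true.mpr ⟨g.1, h', hpg⟩
  | true =>
    rcases List.any_eq_true.mp h with ⟨t, ht, hpt⟩
    obtain ⟨k, hk, hkeq⟩ := keys_foldl_cover col [] t ht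
    rcases List.mem_map.mp hk with ⟨e, he, hek⟩
    have hkcol : k ∈ col := by
      rcases keys_foldl_sub col [] e he with h' | h'
      · simp at h'
      · exact hek ▸ h'
    refine List.any_eq_true.mpr ⟨e, he, ?_⟩
    rw [hek, pred_invariant s k t (hnd k hkcol) (hnd t ht) hkeq]
    exact hpt

-- two distinct positions satisfying p give countP ≥ 2; a unique position gives countP = 1
theorem two_le_countP (L : List (List Int)) (p : List Int → Bool) (i j : Nat)
    (hi : i < L.length) (hj : j < L.length) (hij : i < j)
    (hpi : p L[i] = true) (hpj : p L[j] = true) : 2 ≤ L.countP p := by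
  have hdec : L = L.take j ++ L[j] :: L.drop (j + 1) := by
    conv_lhs => rw [← List.take_append_drop j L]
    rw [List.drop_eq_getElem_cons hj]
  have hmem : L[i] ∈ L.take j := by
    rw [List.mem_iff_getElem]
    exact ⟨i, by simp [List.length_take]; omega, List.getElem_take⟩
  have h1 : 0 < (L.take j).countP p := List.countP_pos_iff.mpr ⟨L[i], hmem, hpi⟩
  calc (2 : Nat) ≤ (L.take j ++ L[j] :: L.drop (j + 1)).countP p := by
        rw [List.countP_append, List.countP_cons]
        simp [hpj]
        omega
    _ = L.countP p := (congrArg (List.countP p) hdec).symm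

theorem countP_eq_one_of (L : List (List Int)) (p : List Int → Bool) (i0 : Nat)
    (hi0 : i0 < L.length) (hp : p L[i0] = true)
    (h : ∀ j, ∀ _ : j < L.length, j ≠ i0 → p L[j] = false) : L.countP p = 1 := by
  have hdec : L = L.take i0 ++ L[i0] :: L.drop (i0 + 1) := by
    conv_lhs => rw [← List.take_append_drop i0 L]
    rw [List.drop_eq_getElem_cons hi0]
  have htake : (L.take i0).countP p = 0 := by
    rw [List.countP_eq_zero]
    intro u hu
    rcases List.mem_iff_getElem.mp hu with ⟨j, hj, hje⟩
    have hji0 : j < i0 := lt_of_lt_of_le hj (by simp [List.length_take])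
    have hjlen : j < L.length := by omega
    rw [List.getElem_take] at hje
    rw [← hje, h j hjlen (Nat.ne_of_lt hji0)]
    simp
  have hdrop : (L.drop (i0 + 1)).countP p = 0 := by
    rw [List.countP_eq_zero]
    intro u hu
    rcases List.mem_iff_getElem.mp hu with ⟨j, hj, hje⟩
    rw [List.getElem_drop] at hje
    have hlen : i0 + 1 + j < L.length := by
      have := hj; simp [List.length_drop] at this; omega
    rw [← hje, h (i0 + 1 + j) hlen (by omega)]
    simp
  calc L.countP p = (L.take i0 ++ L[i0] :: L.drop (i0 + 1)).countP p :=
        congrArg (List.countP p) hdec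
    _ = 1 := by rw [List.countP_append, List.countP_cons, htake, hdrop]; simp [hp]

-- A's inner any, as an existential over indices
theorem anyA_iff (L : List (List Int)) (s : List Int) (k : Nat) :
    ((PySem.List.pyRange 0 (L.length : Int) 1).any
       (fun j => decide ((k : Int) ≠ j) && pySubsetB s (PySem.List.pyGetD L j []))) = true ↔
    ∃ j, ∃ _ : j < L.length, j ≠ k ∧ pySubsetB s L[j] = true := by
  rw [PySem.List.pyRange_one]
  simp only [List.any_map, List.any_eq_true, List.mem_range]
  constructor
  · rintro ⟨j, hj, hp⟩
    simp only [Int.sub_zero, Int.toNat_natCast] at hj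
    simp only [Function.comp, zero_add, Bool.and_eq_true, decide_eq_true_eq,
      PySem.List.pyGetD_natCast] at hp
    refine ⟨j, hj, ?_, ?_⟩
    · exact fun he => hp.1 (by exact_mod_cast he.symm)
    · rw [List.getD_eq_getElem L [] hj] at hp; exact hp.2
  · rintro ⟨j, hj, hne, hle⟩
    refine ⟨j, by simpa using hj, ?_⟩
    simp only [Function.comp, zero_add, Bool.and_eq_true, decide_eq_true_eq,
      PySem.List.pyGetD_natCast]
    exact ⟨fun he => hne (Nat.cast_injective he).symm,
      by rw [List.getD_eq_getElem L [] hj]; exact hle⟩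

-- the value-only keep condition shared by both sides
def qB (L : List (List Int)) (s : List Int) : Bool :=
  ((L.countP (fun t => setEqB t s) : Int) == 1) &&
  !(L.any (fun t => decide (s.length < t.length) && pySubsetB s t))

-- the heart: A's index-based removal test equals the value-based one
theorem keep_eq (L : List (List Int)) (k : Nat) (hk : k < L.length)
    (hnd : ∀ u ∈ L, u.Nodup) :
    ((PySem.List.pyRange 0 (L.length : Int) 1).any
       (fun j => decide ((k : Int) ≠ j) && pySubsetB L[k] (PySem.List.pyGetD L j []))) =
    !(qB L L[k]) := by
  have hndk : L[k].Nodup := hnd _ (List.getElem_mem hk)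
  cases h : ((PySem.List.pyRange 0 (L.length : Int) 1).any
      (fun j => decide ((k : Int) ≠ j) && pySubsetB L[k] (PySem.List.pyGetD L j []))) with
  | false =>
    -- no other superset: count is 1 and no strictly larger superset
    rw [Bool.eq_false_iff] at h
    have hno : ∀ j, ∀ _ : j < L.length, j ≠ k → pySubsetB L[k] L[j] = false := by
      intro j hj hne
      rw [Bool.eq_false_iff]
      intro hc
      exact h ((anyA_iff L L[k] k).mpr ⟨j, hj, hne, hc⟩)
    have hcount : L.countP (fun t => setEqB t L[k]) = 1 := by
      apply countP_eq_one_of L (fun t => setEqB t L[k]) k hk (setEqB_refl _)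
      intro j hj hne
      rw [Bool.eq_false_iff]
      intro hc
      have := (setEqB_iff _ _).mp hc
      have hsub : pySubsetB L[k] L[j] = true := (pySubsetB_iff _ _).mpr this.ge
      rw [hno j hj hne] at hsub
      exact absurd hsub (by simp)
    have hbig : L.any (fun t => decide (L[k].length < t.length) && pySubsetB L[k] t) = false := by
      rw [Bool.eq_false_iff]
      intro hc
      rcases List.any_eq_true.mp hc with ⟨t, ht, hpt⟩
      simp only [Bool.and_eq_true, decide_eq_true_eq] at hpt
      rcases List.mem_iff_getElem.mp ht with ⟨j, hj, hje⟩
      have hne : j ≠ k := by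
        intro he; subst he
        rw [hje] at hpt
        omega
      rw [← hje] at hpt
      rw [hno j hj hne] at hpt
      exact absurd hpt.2 (by simp)
    simp [qB, hcount, hbig]
  | true =>
    rcases (anyA_iff L L[k] k).mp h with ⟨j, hj, hne, hsub⟩
    have hndj : L[j].Nodup := hnd _ (List.getElem_mem hj)
    have hsub' := (pySubsetB_iff _ _).mp hsub
    rcases eq_or_lt_of_le (Finset.card_le_card hsub') with hcard | hcard
    · -- same cardinality: equal as sets, so the count is at least 2
      have heq : L[k].toFinset = L[j].toFinset := Finset.eq_of_subset_of_card_le hsub' hcard.ge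
      have hkj : setEqB L[j] L[k] = true := (setEqB_iff _ _).mpr heq.symm
      have h2 : 2 ≤ L.countP (fun t => setEqB t L[k]) := by
        rcases Nat.lt_or_ge j k with hlt | hge
        · exact two_le_countP L _ j k hj hk hlt hkj (setEqB_refl _)
        · exact two_le_countP L _ k j hk hj (lt_of_le_of_ne hge (fun he => hne he.symm))
            (setEqB_refl _) hkj
      simp only [qB, Bool.not_and, Bool.not_not]
      have : ((L.countP (fun t => setEqB t L[k]) : Int) == 1) = false := by
        rw [beq_eq_false_iff_ne]
        intro hc
        omega
      simp [this]
    · -- strictly larger superset exists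
      have hbig : L.any (fun t => decide (L[k].length < t.length) && pySubsetB L[k] t) = true := by
        refine List.any_eq_true.mpr ⟨L[j], List.getElem_mem hj, ?_⟩
        simp only [Bool.and_eq_true, decide_eq_true_eq]
        exact ⟨by rw [len_card _ hndk, len_card _ hndj]; exact hcard, hsub⟩
      simp [qB, hbig]

-- the enumerate/filterMap of A collapses to a filter once the test is value-only
theorem filterMap_enumerate_filter (L : List (List Int)) (s : Int)
    (f : Int × List Int → Option (List Int)) (q : List Int → Bool)
    (h : ∀ k, ∀ _ : k < L.length, f (s + (k : Int), L[k]) = if q L[k] then some L[k] else none) :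
    (PySem.List.enumerate L s).filterMap f = L.filter q := by
  induction L generalizing s with
  | nil => simp [PySem.List.enumerate_nil]
  | cons x xs ih =>
    rw [PySem.List.enumerate_cons, List.filterMap_cons]
    have h0 : f (s, x) = if q x then some x else none := by
      have := h 0 (by simp)
      simpa using this
    have hrec : (PySem.List.enumerate xs (s + 1)).filterMap f = xs.filter q := by
      apply ih
      intro k hk
      have := h (k + 1) (by simpa using Nat.succ_lt_succ hk)
      push_cast at this
      rw [show s + ((k : Int) + 1) = s + 1 + (k : Int) by ring] at this
      simpa using this
    rw [List.filter_cons, h0]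
    by_cases hq : q x = true <;> simp [hq, hrec]

theorem crit1A_eq_filter (L : List (List Int)) (hnd : ∀ u ∈ L, u.Nodup) :
    crit1A L = L.filter (qB L) := by
  unfold crit1A
  apply filterMap_enumerate_filter L 0
  intro k hk
  simp only [zero_add]
  rw [keep_eq L k hk hnd]
  by_cases hq : qB L L[k] = true <;> simp [hq]

theorem pruneB_eq_filter (L : List (List Int)) (hnd : ∀ u ∈ L, u.Nodup) :
    pruneB L = L.filter (qB L) := by
  unfold pruneB
  apply List.filter_congr
  intro s hs
  rw [cntGet_foldl L [] s, counts_any_eq L s hnd]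
  simp [qB, cntGet]

theorem crit1A_eq_pruneB (L : List (List Int)) (hnd : ∀ u ∈ L, u.Nodup) :
    crit1A L = pruneB L := by
  rw [crit1A_eq_filter L hnd, pruneB_eq_filter L hnd]

-- criterion 2: "a subset one element smaller exists" equals "deleting some element lands in a"
theorem crit2_eq (c0 : List (List Int)) (s : List Int) (hs : s.Nodup)
    (hnd : ∀ u ∈ c0, u.Nodup) :
    (c0.any (fun t => (t.length + 1 == s.length) && pySubsetB t s)) =
    (s.any (fun x => c0.any (fun t => setEqB (s.filter (fun e => decide (e ≠ x))) t))) := by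
  have hfil : ∀ x : Int, (s.filter (fun e => decide (e ≠ x))).toFinset = s.toFinset.erase x := by
    intro x
    ext y
    simp [Finset.mem_erase, and_comm]
  cases h : (c0.any (fun t => (t.length + 1 == s.length) && pySubsetB t s)) with
  | false =>
    symm
    rw [Bool.eq_false_iff]
    intro hc
    rw [Bool.eq_false_iff] at h
    apply h
    rcases List.any_eq_true.mp hc with ⟨x, hx, hax⟩
    rcases List.any_eq_true.mp hax with ⟨t, ht, hteq⟩
    have htnd := hnd t ht
    have heq : (s.filter (fun e => decide (e ≠ x))).toFinset = t.toFinset := (setEqB_iff _ _).mp hteq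
    rw [hfil x] at heq
    have hxs : x ∈ s.toFinset := List.mem_toFinset.mpr hx
    refine List.any_eq_true.mpr ⟨t, ht, ?_⟩
    simp only [Bool.and_eq_true, beq_iff_eq]
    constructor
    · rw [len_card t htnd, len_card s hs, ← heq, Finset.card_erase_of_mem hxs]
      have : 0 < s.toFinset.card := Finset.card_pos.mpr ⟨x, hxs⟩
      omega
    · exact (pySubsetB_iff _ _).mpr (heq ▸ Finset.erase_subset x s.toFinset)
  | true =>
    symm
    rcases List.any_eq_true.mp h with ⟨t, ht, hpt⟩
    simp only [Bool.and_eq_true, beq_iff_eq] at hpt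
    obtain ⟨hlen, hsub⟩ := hpt
    have htnd := hnd t ht
    have hsub' := (pySubsetB_iff t s).mp hsub
    have hcard : t.toFinset.card + 1 = s.toFinset.card := by
      rw [← len_card t htnd, ← len_card s hs]; exact hlen
    obtain ⟨x, hxs, hxt⟩ := Finset.exists_mem_notMem_of_card_lt_card
      (show t.toFinset.card < s.toFinset.card by omega)
    have herase : s.toFinset.erase x = t.toFinset := by
      have h1 : t.toFinset ⊆ s.toFinset.erase x := Finset.subset_erase.mpr ⟨hsub', hxt⟩
      have h2 : (s.toFinset.erase x).card ≤ t.toFinset.card := by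
        rw [Finset.card_erase_of_mem hxs]; omega
      exact (Finset.eq_of_subset_of_card_le h1 h2).symm
    refine List.any_eq_true.mpr ⟨x, List.mem_toFinset.mp hxs, ?_⟩
    refine List.any_eq_true.mpr ⟨t, ht, ?_⟩
    rw [setEqB_iff, hfil x, herase]

-- ===== VERDICT (by name: the statement is the Claim_ definition above) =====
theorem rem_sub_spec : Claim_equal_rem_sub := by
  intro XT _ hpre
  obtain ⟨-, hnd⟩ := hpre
  simp only [Spec_rem_sub, rem_sub, rem_sub_alt]
  have hmem : ∀ i : Int, ∀ u ∈ (PySem.List.pyGet? XT i).getD [], u.Nodup := by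
    intro i u hu
    cases hg : PySem.List.pyGet? XT i with
    | none => rw [hg] at hu; simp at hu
    | some col =>
      rw [hg] at hu
      exact hnd col (PySem.List.mem_of_pyGet?_eq_some XT hg) u hu
  have h0 := crit1A_eq_pruneB _ (hmem 0)
  have h1 := crit1A_eq_pruneB _ (hmem 1)
  rw [h0, h1]
  congr 1
  congr 1
  apply List.filter_congr
  intro s hs
  have hs' : s ∈ (PySem.List.pyGet? XT 1).getD [] := List.mem_of_mem_filter (by
    rw [← pruneB_eq_filter _ (hmem 1)]; exact hs)
  have hsnd : s.Nodup := hmem 1 s hs'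
  have hc0nd : ∀ u ∈ pruneB ((PySem.List.pyGet? XT 0).getD []), u.Nodup := by
    intro u hu
    rw [pruneB_eq_filter _ (hmem 0)] at hu
    exact hmem 0 u (List.mem_of_mem_filter hu)
  rw [crit2_eq _ s hsnd hc0nd]
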